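-- pv_equiv track=rewrite | github.com/mik11231/python | advent2020/Day14/day14_part2.py | run_v2
-- ===== SOURCE A (Python) =====
-- def _floating_addresses(base_addr: int, mask_str: str) -> list[int]:
--     """Generate all addresses produced by the floating-bit mask."""
--     floating_positions: list[int] = []
--     for i, ch in enumerate(mask_str):
--         bit = 35 - i
--         if ch == "1":
--             base_addr |= (1 << bit)
--         elif ch == "X":
--             floating_positions.append(bit)
--
--     # Enumerate all 2^n combinations of floating bits
--     addresses: list[int] = []
--     for combo in range(1 << len(floating_positions)):
--         addr = base_addr
--         for j, bit in enumerate(floating_positions):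
--             if combo & (1 << j):
--                 addr |= (1 << bit)    # set this floating bit to 1
--             else:
--                 addr &= ~(1 << bit)   # set this floating bit to 0
--         addresses.append(addr)
--
--     return addresses
--
-- def run_v2(program: list[tuple[str, ...]]) -> dict[int, int]:
--     """Execute the program with version-2 (address masking) semantics."""
--     memory: dict[int, int] = {}
--     mask_str = "0" * 36
--
--     for instr in program:
--         if instr[0] == "mask":
--             mask_str = instr[1]
--         else:
--             base_addr = int(instr[1])
--             val = int(instr[2])
--             for addr in _floating_addresses(base_addr, mask_str):
--                 memory[addr] = val
--
--     return memory
-- ===== SOURCE B (Python) =====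
-- def _walk(mask, k, addr):
--     """Addresses produced by applying mask[:k] (bit weights 35..36-k) to addr.
--
--     Recursive walk over the mask string from its right end: '1' forces the bit,
--     'X' branches into both bit values (0-branch first), anything else keeps
--     addr's original bit.  The rightmost X varies slowest, which is exactly the
--     enumeration order of the combo counter in the original implementation."""
--     if k == 0:
--         return [addr]
--     bit = 36 - k
--     ch = mask[k - 1]
--     if ch == "1":
--         return _walk(mask, k - 1, addr | (1 << bit))
--     if ch == "X":
--         return (_walk(mask, k - 1, addr & ~(1 << bit))
--                 + _walk(mask, k - 1, addr | (1 << bit)))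
--     return _walk(mask, k - 1, addr)
--
--
-- def run_v2(program):
--     """Execute the program with version-2 (address masking) semantics."""
--     memory = {}
--     mask = "0" * 36
--     for instr in program:
--         if instr[0] == "mask":
--             mask = instr[1]
--         else:
--             base_addr = int(instr[1])
--             val = int(instr[2])
--             for addr in _walk(mask, len(mask), base_addr):
--                 memory[addr] = val
--     return memory
-- ===== Notes on version B (the rewrite author's own statement) =====
-- stated objective: alternative
-- what changed: The floating-address helper no longer precomputes a base value and floating-bit positions and then enumerates all 2^n bit combinations with a combo counter and an inner bit-test loop; instead B walks the mask string recursively from its right end, carrying the partial address, forcing the bit on '1', branching into both bit values on 'X', and keeping the base bit otherwise.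
-- outside the precondition, e.g. on run_v2([('mask', 'XXXXXXXXXXXXXXXXXXXXXXXXXXXXXXXXXXXXX')]): A returns {}, B returns {}
import Mathlib
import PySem

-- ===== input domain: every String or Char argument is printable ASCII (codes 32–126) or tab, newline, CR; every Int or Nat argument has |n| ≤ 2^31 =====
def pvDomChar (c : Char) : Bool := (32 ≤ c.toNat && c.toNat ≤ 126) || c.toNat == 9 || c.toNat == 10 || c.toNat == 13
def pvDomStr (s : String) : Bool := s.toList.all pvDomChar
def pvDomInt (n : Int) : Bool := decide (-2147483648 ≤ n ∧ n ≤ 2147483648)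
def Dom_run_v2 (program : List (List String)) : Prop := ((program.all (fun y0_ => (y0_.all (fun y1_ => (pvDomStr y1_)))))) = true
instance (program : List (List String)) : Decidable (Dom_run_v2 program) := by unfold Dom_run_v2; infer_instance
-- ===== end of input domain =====

-- B replaces A's combo-counter enumeration of floating bits by a recursive walk over the
-- mask string (right-to-left, 'X' branching twice); same values, a different decomposition.

-- ===== PORT A =====
-- first loop of _floating_addresses: OR '1' bits into the base, collect floating bit positions
-- (.toNat on the shift amount: exact for 0 ≤ bit, i.e. masks of length ≤ 36 — Pre_; Python raises otherwise)
def fa_scan (st : Int × List Int) (ic : Int × Char) : Int × List Int :=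
  let bit : Int := 35 - ic.1
  if ic.2 = '1' then (PySem.Int.bor st.1 ((1:Int) <<< bit.toNat), st.2)
  else if ic.2 = 'X' then (st.1, st.2 ++ [bit])
  else st

-- body of the inner loop over enumerate(floating_positions) for one combo
def fa_apply (combo : Int) (addr : Int) (jb : Int × Int) : Int :=
  if PySem.Int.band combo ((1:Int) <<< jb.1.toNat) ≠ 0 then
    PySem.Int.bor addr ((1:Int) <<< jb.2.toNat)
  else
    PySem.Int.band addr (Int.not ((1:Int) <<< jb.2.toNat))

-- _floating_addresses (the Python string is carried as its character list)
def floatingAddresses (base_addr : Int) (mask_str : List Char) : List Int :=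
  let st := (PySem.List.enumerate mask_str).foldl fa_scan (base_addr, [])
  (PySem.List.pyRange 0 ((1:Int) <<< st.2.length)).map
    (fun combo => (PySem.List.enumerate st.2).foldl (fa_apply combo) st.1)

-- run_v2; instr[0]/instr[1]/instr[2] and int() are total here via defaults, exact under Pre_
-- (Pre_ excludes the IndexError / ValueError inputs where Python raises)
def run_v2 (program : List (List String)) : List (Int × Int) :=
  (program.foldl
    (fun (st : PySem.Dict Int Int × List Char) instr =>
      if PySem.List.pyGetD instr 0 "" = "mask" then
        (st.1, (PySem.List.pyGetD instr 1 "").toList)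
      else
        let base_addr := (PySem.Int.ofStr? (PySem.List.pyGetD instr 1 "")).getD 0
        let val := (PySem.Int.ofStr? (PySem.List.pyGetD instr 2 "")).getD 0
        ((floatingAddresses base_addr st.2).foldl (fun mem addr => mem.insert addr val) st.1,
         st.2))
    (PySem.Dict.empty, List.replicate 36 '0')).1.items

-- ===== PORT B =====
-- _walk of Source B: k = number of unprocessed mask characters; processes mask[k-1] (bit 36-k),
-- so with the Lean pattern k+1 the bit is 35-k.  cs.getD is exact: every call keeps k ≤ cs.length.
-- (Source B raises on masks longer than 36 — negative shift — which Pre_ excludes.)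
def walkMask (cs : List Char) : Nat → Int → List Int
  | 0, addr => [addr]
  | k+1, addr =>
    let bit : Nat := 35 - k
    let ch := cs.getD k ' '
    if ch = '1' then walkMask cs k (PySem.Int.bor addr ((1:Int) <<< bit))
    else if ch = 'X' then
      walkMask cs k (PySem.Int.band addr (Int.not ((1:Int) <<< bit))) ++
      walkMask cs k (PySem.Int.bor addr ((1:Int) <<< bit))
    else walkMask cs k addr

def run_v2_alt (program : List (List String)) : List (Int × Int) :=
  (program.foldl
    (fun (st : PySem.Dict Int Int × List Char) instr =>
      if PySem.List.pyGetD instr 0 "" = "mask" then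
        (st.1, (PySem.List.pyGetD instr 1 "").toList)
      else
        let base_addr := (PySem.Int.ofStr? (PySem.List.pyGetD instr 1 "")).getD 0
        let val := (PySem.Int.ofStr? (PySem.List.pyGetD instr 2 "")).getD 0
        ((walkMask st.2 st.2.length base_addr).foldl (fun mem addr => mem.insert addr val) st.1,
         st.2))
    (PySem.Dict.empty, List.replicate 36 '0')).1.items

-- ===== PRECONDITION & SPEC =====
-- Pre_ excludes inputs where A raises (IndexError on short instructions, ValueError from int()
-- or from a negative shift when a mask longer than 36 characters is used) and, slightly more
-- narrowly, every program containing a mask instruction whose string is longer than 36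
-- characters, even when no later mem instruction uses it (there A returns and so does B).
def Pre_run_v2 (program : List (List String)) : Prop :=
  ∀ instr ∈ program,
    if PySem.List.pyGetD instr 0 "" = "mask" then
      2 ≤ instr.length ∧ (PySem.List.pyGetD instr 1 "").toList.length ≤ 36
    else
      3 ≤ instr.length ∧ (PySem.Int.ofStr? (PySem.List.pyGetD instr 1 "")).isSome
        ∧ (PySem.Int.ofStr? (PySem.List.pyGetD instr 2 "")).isSome
instance (program : List (List String)) : Decidable (Pre_run_v2 program) := by
  unfold Pre_run_v2; infer_instance

def pvWitness_run_v2 : List (List String) := [["mask", "X0X1"], ["mem", "8", "11"]]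

def Spec_run_v2 (program : List (List String)) (out : List (Int × Int)) : Prop :=
  out = run_v2_alt program
instance (program : List (List String)) (out : List (Int × Int)) : Decidable (Spec_run_v2 program out) := by
  unfold Spec_run_v2; infer_instance

-- ===== CLAIM =====
def Claim_equal_run_v2 : Prop :=
  ∀ (program : List (List String)), Dom_run_v2 program → Pre_run_v2 program →
    Spec_run_v2 program (run_v2 program)

-- ===== LEMMAS AND PROOFS =====

-- set / clear one bit (proof-side names for the two operations both programs use)
def setBit (b : Nat) (x : Int) : Int := PySem.Int.bor x ((1:Int) <<< b)
def clrBit (b : Nat) (x : Int) : Int := PySem.Int.band x (Int.not ((1:Int) <<< b))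

-- ---- Nat bit toolkit ----
theorem disj_add : ∀ (a b : Nat), a &&& b = 0 → a + b = a ||| b := by
  intro a
  induction a using Nat.binaryRec with
  | zero => simp
  | bit ab a iha =>
    intro b hb
    rw [← Nat.bit_bodd_div2 b] at hb ⊢
    rw [Nat.land_bit] at hb
    rw [Nat.lor_bit]
    rw [Nat.bit_eq_zero_iff] at hb
    have h2 := iha _ hb.1
    have h3 := hb.2
    cases ab <;> cases hbb : b.bodd <;>
      (simp only [Nat.bit_val, hbb] at h3 ⊢; simp at h3 ⊢) <;> omega

theorem sub_and_eq_ldiff (n m : Nat) : n - (n &&& m) = n.ldiff m := by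
  have hd : (n.ldiff m) &&& (n &&& m) = 0 := by
    apply Nat.eq_of_testBit_eq
    intro i
    simp only [Nat.testBit_land, Nat.testBit_ldiff, Nat.zero_testBit]
    cases n.testBit i <;> cases m.testBit i <;> rfl
  have ho : (n.ldiff m) ||| (n &&& m) = n := by
    apply Nat.eq_of_testBit_eq
    intro i
    simp only [Nat.testBit_lor, Nat.testBit_land, Nat.testBit_ldiff]
    cases n.testBit i <;> cases m.testBit i <;> rfl
  have := disj_add _ _ hd
  rw [ho] at this
  have hle : n &&& m ≤ n := by
    calc n &&& m ≤ n.ldiff m + (n &&& m) := by omega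
    _ = n := this
  omega

-- ---- Int testBit toolkit ----
theorem tb_not (x : Int) (i : Nat) : (Int.not x).testBit i = !x.testBit i := by
  cases x <;> simp [Int.not, Int.testBit]

theorem negsucc_eq (k : Nat) : -(k:Int) - 1 = Int.negSucc k := by
  rw [Int.negSucc_eq]; ring

theorem neg_negsucc_sub_one (n : Nat) : (-(Int.negSucc n) - 1) = (n : Int) := by
  rw [Int.negSucc_eq]; ring

theorem tb_bor (a b : Int) (i : Nat) :
    (PySem.Int.bor a b).testBit i = (a.testBit i || b.testBit i) := by
  have hofNat : ∀ m : Nat, (0:Int) ≤ Int.ofNat m := fun m => Int.natCast_nonneg m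
  have hns : ∀ n : Nat, ¬ (0:Int) ≤ Int.negSucc n := fun n => by simp
  cases a with
  | ofNat m =>
    cases b with
    | ofNat n =>
      show (PySem.Int.bor (m:Int) (n:Int)).testBit i = _
      rw [PySem.Int.bor_natCast]; simp [Int.testBit]
    | negSucc n =>
      simp only [PySem.Int.bor, if_neg (hns n), neg_negsucc_sub_one,
        Int.ofNat_eq_natCast, Int.toNat_natCast]
      rw [negsucc_eq]
      show (!(n - (n &&& m)).testBit i) = _
      rw [sub_and_eq_ldiff]
      show _ = (m.testBit i || !n.testBit i)
      rw [Nat.testBit_ldiff]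
      cases m.testBit i <;> cases n.testBit i <;> rfl
  | negSucc m =>
    cases b with
    | ofNat n =>
      simp only [PySem.Int.bor, if_neg (hns m), neg_negsucc_sub_one,
        Int.ofNat_eq_natCast, Int.toNat_natCast]
      rw [negsucc_eq]
      show (!(m - (m &&& n)).testBit i) = _
      rw [sub_and_eq_ldiff]
      show _ = (!m.testBit i || n.testBit i)
      rw [Nat.testBit_ldiff]
      cases m.testBit i <;> cases n.testBit i <;> rfl
    | negSucc n =>
      simp only [PySem.Int.bor, if_neg (hns m), if_neg (hns n), neg_negsucc_sub_one,
        Int.toNat_natCast]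
      rw [negsucc_eq]
      show (!(m &&& n).testBit i) = (!m.testBit i || !n.testBit i)
      rw [Nat.testBit_land]
      cases m.testBit i <;> cases n.testBit i <;> rfl

theorem tb_band (a b : Int) (i : Nat) :
    (PySem.Int.band a b).testBit i = (a.testBit i && b.testBit i) := by
  have hofNat : ∀ m : Nat, (0:Int) ≤ Int.ofNat m := fun m => Int.natCast_nonneg m
  have hns : ∀ n : Nat, ¬ (0:Int) ≤ Int.negSucc n := fun n => by simp
  cases a with
  | ofNat m =>
    cases b with
    | ofNat n =>
      show (PySem.Int.band (m:Int) (n:Int)).testBit i = _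
      rw [PySem.Int.band_natCast]; simp [Int.testBit]
    | negSucc n =>
      simp only [PySem.Int.band, if_neg (hns n), neg_negsucc_sub_one,
        Int.ofNat_eq_natCast, Int.toNat_natCast]
      show ((m - (m &&& n) : Nat) : Int).testBit i = _
      rw [sub_and_eq_ldiff]
      show (m.ldiff n).testBit i = (m.testBit i && !n.testBit i)
      rw [Nat.testBit_ldiff]
  | negSucc m =>
    cases b with
    | ofNat n =>
      simp only [PySem.Int.band, if_neg (hns m), neg_negsucc_sub_one,
        Int.ofNat_eq_natCast, Int.toNat_natCast]
      show ((n - (n &&& m) : Nat) : Int).testBit i = _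
      rw [sub_and_eq_ldiff]
      show (n.ldiff m).testBit i = (!m.testBit i && n.testBit i)
      rw [Nat.testBit_ldiff]
      cases m.testBit i <;> cases n.testBit i <;> rfl
    | negSucc n =>
      simp only [PySem.Int.band, if_neg (hns m), if_neg (hns n), neg_negsucc_sub_one,
        Int.toNat_natCast]
      rw [negsucc_eq]
      show (!(m ||| n).testBit i) = (!m.testBit i && !n.testBit i)
      rw [Nat.testBit_lor]
      cases m.testBit i <;> cases n.testBit i <;> rfl

theorem intExt (x y : Int) (h : ∀ i, x.testBit i = y.testBit i) : x = y := by
  have tbfalse : ∀ (m i : Nat), m < 2 ^ i → m.testBit i = false :=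
    fun m i hmi => Nat.testBit_eq_false_of_lt hmi
  cases x with
  | ofNat m =>
    cases y with
    | ofNat n =>
      have : m = n := Nat.eq_of_testBit_eq (fun i => h i)
      rw [this]
    | negSucc n =>
      exfalso
      have hm : m < 2 ^ (m + n) := lt_of_lt_of_le Nat.lt_two_pow_self
        (Nat.pow_le_pow_right (by omega) (by omega))
      have hn : n < 2 ^ (m + n) := lt_of_lt_of_le Nat.lt_two_pow_self
        (Nat.pow_le_pow_right (by omega) (by omega))
      have := h (m + n)
      rw [show (Int.ofNat m).testBit (m+n) = m.testBit (m+n) from rfl,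
        show (Int.negSucc n).testBit (m+n) = !n.testBit (m+n) from rfl,
        tbfalse _ _ hm, tbfalse _ _ hn] at this
      exact absurd this (by decide)
  | negSucc m =>
    cases y with
    | ofNat n =>
      exfalso
      have hm : m < 2 ^ (m + n) := lt_of_lt_of_le Nat.lt_two_pow_self
        (Nat.pow_le_pow_right (by omega) (by omega))
      have hn : n < 2 ^ (m + n) := lt_of_lt_of_le Nat.lt_two_pow_self
        (Nat.pow_le_pow_right (by omega) (by omega))
      have := h (m + n)
      rw [show (Int.negSucc m).testBit (m+n) = !m.testBit (m+n) from rfl,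
        show (Int.ofNat n).testBit (m+n) = n.testBit (m+n) from rfl,
        tbfalse _ _ hm, tbfalse _ _ hn] at this
      exact absurd this (by decide)
    | negSucc n =>
      have : m = n := Nat.eq_of_testBit_eq (fun i => by
        have := h i
        rw [show (Int.negSucc m).testBit i = !m.testBit i from rfl,
          show (Int.negSucc n).testBit i = !n.testBit i from rfl] at this
        exact Bool.not_inj this)
      rw [this]

theorem shl1_int (b : Nat) : ((1:Int) <<< b) = ((2^b : Nat) : Int) := by
  show Int.ofNat 1 <<< b = _
  rw [show Int.ofNat 1 <<< b = Int.ofNat (1 <<< b) from rfl]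
  simp [Nat.shiftLeft_eq]

theorem tb_shl1 (b i : Nat) : ((1:Int) <<< b).testBit i = decide (b = i) := by
  rw [shl1_int]
  show (2^b : Nat).testBit i = decide (b = i)
  exact Nat.testBit_two_pow

theorem tb_set (b : Nat) (x : Int) (i : Nat) :
    (setBit b x).testBit i = (x.testBit i || decide (b = i)) := by
  simp [setBit, tb_bor, tb_shl1]

theorem tb_clr (b : Nat) (x : Int) (i : Nat) :
    (clrBit b x).testBit i = (x.testBit i && !decide (b = i)) := by
  simp [clrBit, tb_band, tb_not, tb_shl1]

theorem set_set_comm (a b : Nat) (x : Int) : setBit a (setBit b x) = setBit b (setBit a x) := by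
  apply intExt; intro i
  simp only [tb_set]
  cases x.testBit i <;> simp [Bool.or_comm]

theorem clr_clr_comm (a b : Nat) (x : Int) : clrBit a (clrBit b x) = clrBit b (clrBit a x) := by
  apply intExt; intro i
  simp only [tb_clr]
  cases x.testBit i <;> simp [Bool.and_comm]

theorem set_clr_comm (a b : Nat) (hab : a ≠ b) (x : Int) :
    setBit a (clrBit b x) = clrBit b (setBit a x) := by
  apply intExt; intro i
  simp only [tb_set, tb_clr]
  by_cases ha : a = i
  · have hb : ¬ b = i := fun hb => hab (ha ▸ hb ▸ rfl)
    simp [ha, hb]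
  · cases x.testBit i <;> simp [ha]

theorem band_two_pow_ne_zero_iff (c j : Nat) :
    (PySem.Int.band (c : Int) ((1:Int) <<< j) ≠ 0) ↔ c.testBit j = true := by
  rw [shl1_int, PySem.Int.band_natCast, Nat.and_two_pow]
  cases h : c.testBit j <;> simp

-- ---- enumerate / walk list machinery ----
theorem enum_snoc {α : Type} (xs : List α) (c : α) (s : Int) :
    PySem.List.enumerate (xs ++ [c]) s = PySem.List.enumerate xs s ++ [(s + xs.length, c)] := by
  induction xs generalizing s with
  | nil => simp [PySem.List.enumerate]
  | cons x xs ih =>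
    simp [PySem.List.enumerate, ih, List.length_cons]
    ring_nf

theorem walk_prefix (cs : List Char) (c : Char) :
    ∀ (k : Nat), k ≤ cs.length → ∀ a, walkMask (cs ++ [c]) k a = walkMask cs k a := by
  intro k
  induction k generalizing cs with
  | zero => intro _ _; rfl
  | succ k ih =>
    intro hk a
    have hlt : k < cs.length := by omega
    have hg : (cs ++ [c]).getD k ' ' = cs.getD k ' ' := List.getD_append _ _ _ _ hlt
    have hrw := ih cs (by omega)
    simp only [walkMask, hg]
    split_ifs <;> simp [hrw]

-- ---- phase 1 of A (fa_scan fold) ----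
def p1 (base : Int) (cs : List Char) : Int × List Int :=
  (PySem.List.enumerate cs).foldl fa_scan (base, [])

theorem p1_snoc (base : Int) (cs : List Char) (c : Char) :
    p1 base (cs ++ [c]) =
      (if c = '1' then (PySem.Int.bor (p1 base cs).1 ((1:Int) <<< ((35 - (cs.length:Int)).toNat)), (p1 base cs).2)
       else if c = 'X' then ((p1 base cs).1, (p1 base cs).2 ++ [35 - (cs.length:Int)])
       else p1 base cs) := by
  simp [p1, enum_snoc, List.foldl_append, fa_scan]

theorem p1_set (q : Nat) (base : Int) (cs : List Char) :
    p1 (setBit q base) cs = (setBit q (p1 base cs).1, (p1 base cs).2) := by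
  induction cs using List.reverseRecOn with
  | nil => rfl
  | append_singleton cs c ih =>
    rw [p1_snoc, p1_snoc, ih]
    split_ifs
    · exact Prod.ext (set_set_comm _ _ _) rfl
    · rfl
    · rfl

theorem p1_clr (q : Nat) (base : Int) (cs : List Char)
    (hq : ∀ i : Nat, i < cs.length → 35 - i ≠ q) (hlen : cs.length ≤ 36) :
    p1 (clrBit q base) cs = (clrBit q (p1 base cs).1, (p1 base cs).2) := by
  induction cs using List.reverseRecOn with
  | nil => rfl
  | append_singleton cs c ih =>
    have hih := ih (fun i hi => hq i (by simp; omega)) (by simp at hlen ⊢; omega)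
    rw [p1_snoc, p1_snoc, hih]
    have hne : (35 - (cs.length : Int)).toNat ≠ q := by
      have h1 : cs.length ≤ 35 := by simp at hlen; omega
      have h2 : (35 - (cs.length : Int)).toNat = 35 - cs.length := by omega
      rw [h2]
      exact hq cs.length (by simp)
    split_ifs
    · exact Prod.ext (set_clr_comm _ _ hne _) rfl
    · rfl
    · rfl

theorem p1_ps_shape (base : Int) (cs : List Char) :
    ∀ q ∈ (p1 base cs).2, ∃ i : Nat, i < cs.length ∧ q = 35 - (i : Int) := by
  induction cs using List.reverseRecOn with
  | nil => intro q hq; simp [p1, PySem.List.enumerate] at hq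
  | append_singleton cs c ih =>
    intro q hq
    rw [p1_snoc] at hq
    split_ifs at hq
    · obtain ⟨i, hi, rfl⟩ := ih q hq
      exact ⟨i, by simp; omega, rfl⟩
    · simp only [List.mem_append, List.mem_singleton] at hq
      rcases hq with hq | rfl
      · obtain ⟨i, hi, rfl⟩ := ih q hq
        exact ⟨i, by simp; omega, rfl⟩
      · exact ⟨cs.length, by simp, rfl⟩
    · obtain ⟨i, hi, rfl⟩ := ih q hq
      exact ⟨i, by simp; omega, rfl⟩

-- ---- phase 2 of A (combos) ----
def applyCombo (b : Int) (ps : List Int) (combo : Int) : Int :=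
  (PySem.List.enumerate ps).foldl (fa_apply combo) b

def combos (b : Int) (ps : List Int) : List Int :=
  (PySem.List.pyRange 0 ((1:Int) <<< ps.length)).map (applyCombo b ps)

theorem ac_snoc (b : Int) (ps : List Int) (p : Int) (combo : Int) :
    applyCombo b (ps ++ [p]) combo
      = fa_apply combo (applyCombo b ps combo) ((ps.length : Int), p) := by
  simp [applyCombo, enum_snoc, List.foldl_append]

theorem ac_congr (b : Int) (ps : List Int) (c1 c2 : Nat)
    (h : ∀ j : Nat, j < ps.length → c1.testBit j = c2.testBit j) :
    applyCombo b ps (c1 : Int) = applyCombo b ps (c2 : Int) := by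
  induction ps using List.reverseRecOn generalizing b with
  | nil => rfl
  | append_singleton ps p ih =>
    rw [ac_snoc, ac_snoc, ih b (fun j hj => h j (by simp; omega))]
    simp only [fa_apply, Int.toNat_natCast]
    have htb : c1.testBit ps.length = c2.testBit ps.length := h ps.length (by simp)
    by_cases hc : PySem.Int.band (c1 : Int) ((1:Int) <<< ps.length) ≠ 0
    · have hc2 : PySem.Int.band (c2 : Int) ((1:Int) <<< ps.length) ≠ 0 := by
        rw [band_two_pow_ne_zero_iff] at hc ⊢; rw [← htb]; exact hc
      rw [if_pos hc, if_pos hc2]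
    · have hc2 : ¬ PySem.Int.band (c2 : Int) ((1:Int) <<< ps.length) ≠ 0 := by
        intro hne
        rw [band_two_pow_ne_zero_iff] at hne hc
        exact hc (htb ▸ hne)
      rw [if_neg hc, if_neg hc2]

theorem ac_set (q : Nat) (b : Int) (ps : List Int) (combo : Int)
    (hq : ∀ p ∈ ps, p.toNat ≠ q) :
    applyCombo (setBit q b) ps combo = setBit q (applyCombo b ps combo) := by
  induction ps using List.reverseRecOn generalizing b with
  | nil => rfl
  | append_singleton ps p ih =>
    rw [ac_snoc, ac_snoc, ih b (fun x hx => hq x (by simp [hx]))]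
    have hpq : p.toNat ≠ q := hq p (by simp)
    simp only [fa_apply]
    split_ifs
    · exact (set_set_comm _ _ _)
    · exact (set_clr_comm q p.toNat (fun he => hpq he.symm) _).symm

theorem ac_clr (q : Nat) (b : Int) (ps : List Int) (combo : Int)
    (hq : ∀ p ∈ ps, p.toNat ≠ q) :
    applyCombo (clrBit q b) ps combo = clrBit q (applyCombo b ps combo) := by
  induction ps using List.reverseRecOn generalizing b with
  | nil => rfl
  | append_singleton ps p ih =>
    rw [ac_snoc, ac_snoc, ih b (fun x hx => hq x (by simp [hx]))]
    have hpq : p.toNat ≠ q := hq p (by simp)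
    simp only [fa_apply]
    split_ifs
    · exact (set_clr_comm p.toNat q hpq _)
    · exact (clr_clr_comm _ _ _)

theorem combos_snoc (b : Int) (ps : List Int) (p : Int) :
    combos b (ps ++ [p]) =
      (combos b ps).map (clrBit p.toNat) ++ (combos b ps).map (setBit p.toNat) := by
  simp only [combos, List.length_append, List.length_singleton, shl1_int,
    PySem.List.pyRange_zero_natCast, List.map_map]
  rw [show (2:Nat) ^ (ps.length + 1) = 2 ^ ps.length + 2 ^ ps.length by ring]
  rw [List.range_add]
  simp only [List.map_append, List.map_map]
  congr 1
  · apply List.map_congr_left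
    intro c hc
    have hclt : c < 2 ^ ps.length := List.mem_range.mp hc
    have htb : c.testBit ps.length = false := Nat.testBit_lt_two_pow hclt
    show applyCombo b (ps ++ [p]) (c : Int) = clrBit p.toNat (applyCombo b ps (c : Int))
    rw [ac_snoc]
    simp only [fa_apply, Int.toNat_natCast]
    rw [if_neg]
    · rfl
    · intro hcon
      rw [band_two_pow_ne_zero_iff, htb] at hcon
      cases hcon
  · apply List.map_congr_left
    intro c hc
    have hclt : c < 2 ^ ps.length := List.mem_range.mp hc
    have htb : c.testBit ps.length = false := Nat.testBit_lt_two_pow hclt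
    show applyCombo b (ps ++ [p]) ((2 ^ ps.length + c : Nat) : Int)
        = setBit p.toNat (applyCombo b ps (c : Int))
    rw [ac_snoc]
    simp only [fa_apply, Int.toNat_natCast]
    rw [if_pos]
    · rw [ac_congr b ps (2 ^ ps.length + c) c
        (fun j hj => Nat.testBit_two_pow_add_gt hj c)]
      rfl
    · rw [band_two_pow_ne_zero_iff, Nat.testBit_two_pow_add_eq, htb]
      rfl

theorem combos_set (q : Nat) (b : Int) (ps : List Int) (hq : ∀ p ∈ ps, p.toNat ≠ q) :
    combos (setBit q b) ps = (combos b ps).map (setBit q) := by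
  simp [combos, List.map_map]
  exact fun c _ _ => ac_set q b ps c hq

theorem combos_clr (q : Nat) (b : Int) (ps : List Int) (hq : ∀ p ∈ ps, p.toNat ≠ q) :
    combos (clrBit q b) ps = (combos b ps).map (clrBit q) := by
  simp [combos, List.map_map]
  exact fun c _ _ => ac_clr q b ps c hq

-- ---- the main per-mask lemma ----
theorem fa_combos (base : Int) (cs : List Char) :
    floatingAddresses base cs = combos (p1 base cs).1 (p1 base cs).2 := rfl

theorem fa_eq_walk : ∀ (cs : List Char), cs.length ≤ 36 → ∀ (base : Int),
    floatingAddresses base cs = walkMask cs cs.length base := by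
  intro cs
  induction cs using List.reverseRecOn with
  | nil =>
    intro _ base
    show floatingAddresses base [] = [base]
    unfold floatingAddresses
    simp [PySem.List.enumerate]
  | append_singleton cs c ih =>
    intro hlen base
    have hn : cs.length ≤ 35 := by
      have := hlen; simp only [List.length_append, List.length_singleton] at this; omega
    have hlen' : cs.length ≤ 36 := by omega
    have hcount : (cs ++ [c]).length = cs.length + 1 := by simp
    have hget : (cs ++ [c]).getD cs.length ' ' = c := by
      rw [List.getD_eq_getElem _ _ (by simp)]
      exact List.getElem_concat_length rfl _
    have htn : ((35 : Int) - (cs.length : Int)).toNat = 35 - cs.length := by omega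
    have hq1 : ∀ i : Nat, i < cs.length → 35 - i ≠ 35 - cs.length := fun i hi => by omega
    have hq2 : ∀ p ∈ (p1 base cs).2, p.toNat ≠ 35 - cs.length := by
      intro p hp
      obtain ⟨i, hi, rfl⟩ := p1_ps_shape base cs p hp
      have : ((35:Int) - (i:Int)).toNat = 35 - i := by omega
      rw [this]
      omega
    rw [fa_combos, p1_snoc, hcount]
    conv_rhs => rw [walkMask]
    simp only [hget]
    by_cases h1 : c = '1'
    · rw [if_pos h1, if_pos h1, walk_prefix cs c cs.length le_rfl,
        ← ih hlen' (PySem.Int.bor base ((1:Int) <<< (35 - cs.length))), fa_combos]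
      rw [show p1 (PySem.Int.bor base ((1:Int) <<< (35 - cs.length))) cs
            = p1 (setBit (35 - cs.length) base) cs from rfl, p1_set, htn]
      rfl
    · rw [if_neg h1, if_neg h1]
      by_cases hX : c = 'X'
      · rw [if_pos hX, if_pos hX, combos_snoc, htn,
          walk_prefix cs c cs.length le_rfl, walk_prefix cs c cs.length le_rfl,
          ← ih hlen' (PySem.Int.band base (Int.not ((1:Int) <<< (35 - cs.length)))),
          ← ih hlen' (PySem.Int.bor base ((1:Int) <<< (35 - cs.length))),
          fa_combos, fa_combos]
        rw [show p1 (PySem.Int.band base (Int.not ((1:Int) <<< (35 - cs.length)))) cs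
              = p1 (clrBit (35 - cs.length) base) cs from rfl, p1_clr _ _ _ hq1 hlen']
        rw [show p1 (PySem.Int.bor base ((1:Int) <<< (35 - cs.length))) cs
              = p1 (setBit (35 - cs.length) base) cs from rfl, p1_set]
        rw [combos_clr _ _ _ hq2, combos_set _ _ _ hq2]
      · rw [if_neg hX, if_neg hX, walk_prefix cs c cs.length le_rfl, ← ih hlen' base,
          fa_combos]

-- ---- outer loop ----
theorem fold_eq : ∀ (prog : List (List String)) (st : PySem.Dict Int Int × List Char),
    Pre_run_v2 prog → st.2.length ≤ 36 →
    prog.foldl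
      (fun (st : PySem.Dict Int Int × List Char) instr =>
        if PySem.List.pyGetD instr 0 "" = "mask" then
          (st.1, (PySem.List.pyGetD instr 1 "").toList)
        else
          let base_addr := (PySem.Int.ofStr? (PySem.List.pyGetD instr 1 "")).getD 0
          let val := (PySem.Int.ofStr? (PySem.List.pyGetD instr 2 "")).getD 0
          ((floatingAddresses base_addr st.2).foldl (fun mem addr => mem.insert addr val) st.1,
           st.2)) st
    = prog.foldl
      (fun (st : PySem.Dict Int Int × List Char) instr =>
        if PySem.List.pyGetD instr 0 "" = "mask" then
          (st.1, (PySem.List.pyGetD instr 1 "").toList)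
        else
          let base_addr := (PySem.Int.ofStr? (PySem.List.pyGetD instr 1 "")).getD 0
          let val := (PySem.Int.ofStr? (PySem.List.pyGetD instr 2 "")).getD 0
          ((walkMask st.2 st.2.length base_addr).foldl (fun mem addr => mem.insert addr val) st.1,
           st.2)) st := by
  intro prog
  induction prog with
  | nil => intro st _ _; rfl
  | cons instr rest ih =>
    intro st hpre hlen
    have hhead := hpre instr (by simp)
    have hrest : Pre_run_v2 rest := fun i hi => hpre i (by simp [hi])
    simp only [List.foldl_cons]
    by_cases hm : PySem.List.pyGetD instr 0 "" = "mask"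
    · rw [if_pos hm, if_pos hm]
      apply ih _ hrest
      rw [if_pos hm] at hhead
      exact hhead.2
    · rw [if_neg hm, if_neg hm]
      simp only [fa_eq_walk st.2 hlen]
      exact ih _ hrest hlen

-- ===== VERDICT =====
theorem run_v2_spec : Claim_equal_run_v2 := by
  intro program _hdom hpre
  show run_v2 program = run_v2_alt program
  unfold run_v2 run_v2_alt
  rw [fold_eq program _ hpre (by simp)]
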